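-- pv_equiv track=rewrite | github.com/cristianbass01/NLI_project | cristian/agent.py | concatenate_user_act_type_slots
-- ===== SOURCE A (Python) =====
-- def concatenate_user_act_type_slots(user_utterance, user_act_type_to_slots):
--
--     historical_utterance = user_utterance + " | "
--     for act_type in user_act_type_to_slots:
--         historical_utterance += act_type + " = "
--         for slot_name, slot_value in user_act_type_to_slots[act_type]:
--             historical_utterance += slot_name + " : " + slot_value + " , "
--
--         if len(user_act_type_to_slots[act_type]) > 0:
--             # Remove last comma
--             historical_utterance = historical_utterance[:-3]
--
--         historical_utterance += " ; "
--
--     if len(user_act_type_to_slots) > 0: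
--         # Remove last semicolon
--         historical_utterance = historical_utterance[:-3]
--
--     return historical_utterance
-- ===== SOURCE B (Python) =====
-- def concatenate_user_act_type_slots(user_utterance, user_act_type_to_slots):
--     parts = [
--         act_type + " = " + " , ".join(
--             slot_name + " : " + slot_value for slot_name, slot_value in slots)
--         for act_type, slots in user_act_type_to_slots.items()
--     ]
--     return user_utterance + " | " + " ; ".join(parts)
-- ===== Notes on version B (the rewrite author's own statement) =====
-- stated objective: idiomatic
-- what changed: Replaces the append-then-strip accumulator (with two conditional [:-3] trims) by separator-interposing str.join over a comprehension of per-act parts; Pre_ excludes association lists with duplicate act-type keys, which do not denote a unique Python dict.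
import Mathlib
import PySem

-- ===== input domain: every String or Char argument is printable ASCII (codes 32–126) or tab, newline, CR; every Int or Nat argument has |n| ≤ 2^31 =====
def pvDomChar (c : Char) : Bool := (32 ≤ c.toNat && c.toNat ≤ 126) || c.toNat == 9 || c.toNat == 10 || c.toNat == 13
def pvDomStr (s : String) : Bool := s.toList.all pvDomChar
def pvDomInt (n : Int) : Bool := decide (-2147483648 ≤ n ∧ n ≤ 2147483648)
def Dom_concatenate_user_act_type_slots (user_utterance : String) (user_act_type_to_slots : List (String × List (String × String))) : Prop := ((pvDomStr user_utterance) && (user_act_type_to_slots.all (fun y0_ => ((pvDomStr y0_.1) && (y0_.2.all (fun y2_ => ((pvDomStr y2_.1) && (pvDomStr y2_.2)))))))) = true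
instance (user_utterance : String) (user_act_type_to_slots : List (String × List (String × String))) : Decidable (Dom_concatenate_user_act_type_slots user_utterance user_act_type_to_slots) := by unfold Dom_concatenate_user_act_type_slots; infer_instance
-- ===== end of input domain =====

-- B replaces A's append-then-strip accumulator (two conditional [:-3] trims) by
-- separator-interposing joins; same O(n) work, cleaner decomposition (objective: idiomatic).

-- ===== PORT A =====
-- Literal transliteration of A: a string accumulator, nested loops appending
-- "name : value , " chunks, conditional [:-3] trims (PySem.List.slice … (-3)).
-- 'user_act_type_to_slots[act_type]' is dict lookup = first match in the assoc list.
def concatenate_user_act_type_slots (user_utterance : String) (user_act_type_to_slots : List (String × List (String × String))) : String :=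
  let h0 := user_utterance.toList ++ [' ', '|', ' ']
  let h1 := user_act_type_to_slots.foldl (fun h p =>
    let slots := ((PySem.Dict.mk user_act_type_to_slots).get? p.1).getD []
    let h := h ++ p.1.toList ++ [' ', '=', ' ']
    let h := slots.foldl (fun h s => h ++ s.1.toList ++ [' ', ':', ' '] ++ s.2.toList ++ [' ', ',', ' ']) h
    let h := if slots.length > 0 then PySem.List.slice h none (some (-3)) else h
    h ++ [' ', ';', ' ']) h0
  let h2 := if user_act_type_to_slots.length > 0 then PySem.List.slice h1 none (some (-3)) else h1
  String.ofList h2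

-- ===== PORT B =====
-- act_type + " = " + " , ".join(name + " : " + value for name, value in slots)
def csPart (p : String × List (String × String)) : List Char :=
  p.1.toList ++ [' ', '=', ' '] ++
    PySem.Chars.join [' ', ',', ' '] (p.2.map (fun s => s.1.toList ++ [' ', ':', ' '] ++ s.2.toList))

def concatenate_user_act_type_slots_alt (user_utterance : String) (user_act_type_to_slots : List (String × List (String × String))) : String :=
  String.ofList (user_utterance.toList ++ [' ', '|', ' '] ++
    PySem.Chars.join [' ', ';', ' '] (user_act_type_to_slots.map csPart))

-- ===== PRECONDITION & SPEC =====
-- Pre_ excludes association lists with duplicate act-type keys: they do not denote a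
-- unique Python dict (duplicates collapse at dict construction), so the corner is accidental.
def Pre_concatenate_user_act_type_slots (user_utterance : String) (user_act_type_to_slots : List (String × List (String × String))) : Prop :=
  (user_act_type_to_slots.map Prod.fst).Nodup
instance (user_utterance : String) (user_act_type_to_slots : List (String × List (String × String))) : Decidable (Pre_concatenate_user_act_type_slots user_utterance user_act_type_to_slots) := by unfold Pre_concatenate_user_act_type_slots; infer_instance

def pvWitness_concatenate_user_act_type_slots : String × (List (String × List (String × String))) :=
  ("u", [("a", [("x", "y")])])

def Spec_concatenate_user_act_type_slots (user_utterance : String) (user_act_type_to_slots : List (String × List (String × String))) (out : String) : Prop := out = concatenate_user_act_type_slots_alt user_utterance user_act_type_to_slots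
instance (user_utterance : String) (user_act_type_to_slots : List (String × List (String × String))) (out : String) : Decidable (Spec_concatenate_user_act_type_slots user_utterance user_act_type_to_slots out) := by unfold Spec_concatenate_user_act_type_slots; infer_instance

-- ===== CLAIM (what is proved, stated in full; the proofs are below) =====
def Claim_equal_concatenate_user_act_type_slots : Prop := ∀ (user_utterance : String) (user_act_type_to_slots : List (String × List (String × String))), Dom_concatenate_user_act_type_slots user_utterance user_act_type_to_slots → Pre_concatenate_user_act_type_slots user_utterance user_act_type_to_slots → Spec_concatenate_user_act_type_slots user_utterance user_act_type_to_slots (concatenate_user_act_type_slots user_utterance user_act_type_to_slots)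

-- ===== LEMMAS AND PROOFS =====

-- first-match lookup of a key of d finds exactly that entry when keys are distinct
lemma pvFind_nodup {d : List (String × List (String × String))}
    (hnd : (d.map Prod.fst).Nodup) {p : String × List (String × String)} (hp : p ∈ d) :
    d.find? (fun q => q.1 == p.1) = some p := by
  induction d with
  | nil => cases hp
  | cons q rest ih =>
    simp only [List.map_cons, List.nodup_cons] at hnd
    rcases List.mem_cons.mp hp with h | h
    · subst h; simp [List.find?]
    · have hne : q.1 ≠ p.1 := by
        intro he
        exact hnd.1 (he ▸ List.mem_map_of_mem h)
      simp only [List.find?]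
      rw [show (q.1 == p.1) = false from beq_eq_false_iff_ne.mpr hne]
      exact ih hnd.2 h

-- appending "f x ++ sep" per element equals join-with-sep plus one trailing sep (l ≠ [])
lemma pvFlatMap_sep {α : Type} (f : α → List Char) (sep : List Char) :
    ∀ l : List α, l ≠ [] →
      l.flatMap (fun x => f x ++ sep) = PySem.Chars.join sep (l.map f) ++ sep
  | [], h => absurd rfl h
  | [x], _ => by simp [PySem.Chars.join_singleton]
  | x :: y :: rest, _ => by
    have ih := pvFlatMap_sep f sep (y :: rest) (by simp)
    simp only [List.flatMap_cons] at ih ⊢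
    rw [List.map_cons, List.map_cons, PySem.Chars.join_cons_cons, ← List.map_cons, ih]
    simp [List.append_assoc]

-- [:-3] removes an appended 3-character suffix
lemma pvTrim3 (a b : List Char) (hb : b.length = 3) :
    PySem.List.slice (a ++ b) none (some (-3)) = a := by
  rw [PySem.List.slice_to_neg_ofNat (a ++ b) 3 (by omega)]
  simp [hb]

-- ===== VERDICT (by name: the statement is the Claim_ definition above) =====
theorem concatenate_user_act_type_slots_spec : Claim_equal_concatenate_user_act_type_slots := by
  intro u d _ hnd
  unfold Spec_concatenate_user_act_type_slots
  unfold concatenate_user_act_type_slots concatenate_user_act_type_slots_alt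
  simp only []
  have hstep : ∀ (h : List Char), ∀ p ∈ d,
      (let slots := ((PySem.Dict.mk d).get? p.1).getD []
       let h' := h ++ p.1.toList ++ [' ', '=', ' ']
       let h'' := slots.foldl (fun h s => h ++ s.1.toList ++ [' ', ':', ' '] ++ s.2.toList ++ [' ', ',', ' ']) h'
       let h''' := if slots.length > 0 then PySem.List.slice h'' none (some (-3)) else h''
       h''' ++ [' ', ';', ' ']) = h ++ (csPart p ++ [' ', ';', ' ']) := by
    intro h p hp
    have hlook : ((PySem.Dict.mk d).get? p.1).getD [] = p.2 := by
      simp [PySem.Dict.get?, pvFind_nodup hnd hp]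
    simp only [hlook]
    have hfold : p.2.foldl (fun h s => h ++ s.1.toList ++ [' ', ':', ' '] ++ s.2.toList ++ [' ', ',', ' ']) (h ++ p.1.toList ++ [' ', '=', ' '])
        = (h ++ p.1.toList ++ [' ', '=', ' ']) ++ p.2.flatMap (fun s => (s.1.toList ++ [' ', ':', ' '] ++ s.2.toList) ++ [' ', ',', ' ']) := by
      rw [PySem.List.foldl_congr_mem p.2 _
        (fun acc s => acc ++ ((s.1.toList ++ [' ', ':', ' '] ++ s.2.toList) ++ [' ', ',', ' '])) _
        (by intro acc s _; simp [List.append_assoc])]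
      exact PySem.List.foldl_append_eq_flatMap _ _ _
    rw [hfold]
    rcases eq_or_ne p.2 [] with he | he
    · simp [he, csPart, PySem.Chars.join_nil]
    · have hlen : 0 < p.2.length := List.length_pos_iff.mpr he
      rw [pvFlatMap_sep _ _ _ he]
      simp only [if_pos hlen]
      rw [← List.append_assoc, pvTrim3 _ [' ', ',', ' '] rfl]
      simp [csPart, List.append_assoc]
  rw [PySem.List.foldl_congr_mem d _ (fun h p => h ++ (csPart p ++ [' ', ';', ' '])) _ hstep,
    PySem.List.foldl_append_eq_flatMap]
  rcases eq_or_ne d [] with hd | hd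
  · simp [hd]
  · have hlen : 0 < d.length := List.length_pos_iff.mpr hd
    rw [pvFlatMap_sep csPart _ d hd]
    simp only [if_pos hlen]
    rw [show u.toList ++ [' ', '|', ' '] ++ (PySem.Chars.join [' ', ';', ' '] (d.map csPart) ++ [' ', ';', ' '])
        = (u.toList ++ [' ', '|', ' '] ++ PySem.Chars.join [' ', ';', ' '] (d.map csPart)) ++ [' ', ';', ' '] from by simp [List.append_assoc]]
    rw [pvTrim3 _ [' ', ';', ' '] rfl]
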